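-- pv_equiv track=rewrite | github.com/Livioni/YOLOS | models/backbone.py | __update_row
-- ===== SOURCE A (Python) =====
-- def __update_row(row : list, drop_indexes : set):
--     if len(drop_indexes) == 0:
--         return row
--     row = sorted(row)
--     cnt = 0
--     for i in (range(len(row))):
--         if row[i] in drop_indexes:
--             row[i] = -1
--             cnt += 1
--         else:
--             row[i] -= cnt
--     row = [x for x in row if x != -1]
--     return row
-- ===== SOURCE B (Python) =====
-- import bisect
--
-- def __update_row(row : list, drop_indexes : set):
--     if len(drop_indexes) == 0:
--         return row
--     kept = sorted(v for v in row if v not in drop_indexes)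
--     dropped = sorted(v for v in row if v in drop_indexes)
--     return [v - bisect.bisect_left(dropped, v) for v in kept]
-- ===== Notes on version B (the rewrite author's own statement) =====
-- stated objective: alternative
-- what changed: Replaces A's fused sort-then-scan with an in-place -1 sentinel marking and running drop counter by a split into kept/dropped sublists where each sorted kept value is renumbered via a binary search (bisect_left) into the sorted dropped list.
-- intended difference: On rows with a kept value v (v not in drop_indexes) whose renumbered value v minus the count of dropped row entries below v equals -1 (e.g. row=[-1], drop_indexes={5}), A silently discards that kept value because its renumbered value collides with A's in-place deletion sentinel -1, while B keeps it; keeping the value is intended since -1 is merely A's internal marker. — e.g. on __update_row([-1], [5]): A returns [], B returns [-1]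
import Mathlib
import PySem

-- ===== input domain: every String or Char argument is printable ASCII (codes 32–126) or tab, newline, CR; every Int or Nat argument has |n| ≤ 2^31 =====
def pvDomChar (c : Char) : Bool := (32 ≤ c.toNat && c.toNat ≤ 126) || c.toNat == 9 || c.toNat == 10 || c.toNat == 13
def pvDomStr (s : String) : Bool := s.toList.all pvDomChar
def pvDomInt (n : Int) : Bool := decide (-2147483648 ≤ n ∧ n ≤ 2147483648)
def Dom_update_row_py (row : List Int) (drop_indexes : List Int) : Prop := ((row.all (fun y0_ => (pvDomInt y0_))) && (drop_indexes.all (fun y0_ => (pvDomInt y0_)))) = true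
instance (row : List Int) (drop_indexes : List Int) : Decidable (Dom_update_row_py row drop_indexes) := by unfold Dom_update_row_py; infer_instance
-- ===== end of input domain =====

-- B splits the row into kept and dropped values and renumbers each sorted kept value by a
-- binary search into the sorted dropped list, instead of A's in-place sentinel-marking scan
-- with a running counter; on D_ (a kept value renumbering to -1) B keeps the value A discards.


-- ===== PORT A =====
-- the for-i loop: in-place update of the sorted row with running counter cnt,
-- rendered as structural recursion producing the updated list (same values, same order)
def aLoop (drop_indexes : List Int) : List Int → Int → List Int
  | [], _ => []
  | x :: t, cnt =>
    if drop_indexes.contains x then (-1) :: aLoop drop_indexes t (cnt + 1)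
    else (x - cnt) :: aLoop drop_indexes t cnt

def update_row_py (row : List Int) (drop_indexes : List Int) : List Int :=
  if drop_indexes.length == 0 then row
  else
    let row1 := PySem.List.sorted row (fun x => x)
    let row2 := aLoop drop_indexes row1 0
    row2.filter (fun x => decide (x ≠ -1))

-- ===== PORT B =====
def update_row_py_alt (row : List Int) (drop_indexes : List Int) : List Int :=
  if drop_indexes.length == 0 then row
  else
    let kept := PySem.List.sorted (row.filter (fun v => !drop_indexes.contains v)) (fun x => x)
    let dropped := PySem.List.sorted (row.filter (fun v => drop_indexes.contains v)) (fun x => x)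
    kept.map (fun v => v - (PySem.List.bisectLeft dropped v : Int))

-- ===== PRECONDITION & SPEC =====
-- On rows with a kept value v whose renumbered value (v minus the number of dropped row
-- entries below v) equals -1, A silently discards that kept value because it collides with
-- A's in-place deletion sentinel -1, while B keeps it; B's value is the intended one.
def D_update_row_py (row : List Int) (drop_indexes : List Int) : Prop :=
  drop_indexes ≠ [] ∧ ∃ v ∈ row, v ∉ drop_indexes ∧
    v - (row.countP (fun x => drop_indexes.contains x && decide (x < v)) : Int) = -1
instance (row : List Int) (drop_indexes : List Int) : Decidable (D_update_row_py row drop_indexes) := by unfold D_update_row_py; infer_instance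

def Spec_update_row_py (row : List Int) (drop_indexes : List Int) (out : List Int) : Prop := ¬ D_update_row_py row drop_indexes → out = update_row_py_alt row drop_indexes
instance (row : List Int) (drop_indexes : List Int) (out : List Int) : Decidable (Spec_update_row_py row drop_indexes out) := by unfold Spec_update_row_py; infer_instance

def pvDiffWitness_update_row_py : List Int × List Int := ([-1], [5])
def pvDiffWitnessOut_update_row_py : (List Int) × (List Int) := ([], [-1])

-- ===== CLAIM (what is proved, stated in full; the proofs are below) =====
def Claim_unchanged_update_row_py : Prop := ∀ (row : List Int) (drop_indexes : List Int), Dom_update_row_py row drop_indexes → Spec_update_row_py row drop_indexes (update_row_py row drop_indexes)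
def Claim_changed_update_row_py : Prop := Dom_update_row_py (pvDiffWitness_update_row_py.1) (pvDiffWitness_update_row_py.2) ∧ D_update_row_py (pvDiffWitness_update_row_py.1) (pvDiffWitness_update_row_py.2) ∧ update_row_py (pvDiffWitness_update_row_py.1) (pvDiffWitness_update_row_py.2) = pvDiffWitnessOut_update_row_py.1 ∧ update_row_py_alt (pvDiffWitness_update_row_py.1) (pvDiffWitness_update_row_py.2) = pvDiffWitnessOut_update_row_py.2 ∧ pvDiffWitnessOut_update_row_py.1 ≠ pvDiffWitnessOut_update_row_py.2
def Claim_exact_update_row_py : Prop := ∀ (row : List Int) (drop_indexes : List Int), Dom_update_row_py row drop_indexes → D_update_row_py row drop_indexes → update_row_py row drop_indexes ≠ update_row_py_alt row drop_indexes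

-- ===== LEMMAS AND PROOFS =====

-- bisect_left on a sorted list counts the elements strictly below the probe
lemma bisectLeft_eq_countP (xs : List Int) (v : Int)
    (h : List.Pairwise (fun a b => a ≤ b) xs) :
    PySem.List.bisectLeft xs v = xs.countP (fun x => decide (x < v)) := by
  obtain ⟨hk, hlt, hge⟩ := PySem.List.bisectLeft_spec xs v h
  set k := PySem.List.bisectLeft xs v with hkdef
  have h1 : (xs.take k).countP (fun x => decide (x < v)) = k := by
    rw [List.countP_eq_length.mpr, List.length_take, Nat.min_eq_left hk]
    intro a ha
    rw [List.mem_take_iff_getElem] at ha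
    obtain ⟨j, hj, rfl⟩ := ha
    simpa using hlt j (lt_of_lt_of_le (lt_min_iff.mp hj).1 hk) (lt_min_iff.mp hj).1
  have h2 : (xs.drop k).countP (fun x => decide (x < v)) = 0 := by
    rw [List.countP_eq_zero]
    intro a ha
    rw [List.mem_drop_iff_getElem] at ha
    obtain ⟨j, hj, rfl⟩ := ha
    simpa using not_lt.mpr (hge (k + j) (by omega) (by omega))
  conv_rhs => rw [← List.take_append_drop k xs]
  rw [List.countP_append, h1, h2]
  omega

-- core: A's marked-and-filtered scan of a sorted list equals the filtered renumbering map
lemma aLoop_filter (drop_indexes : List Int) :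
    ∀ (s : List Int), List.Pairwise (fun a b => a ≤ b) s → ∀ (cnt : Int),
      (aLoop drop_indexes s cnt).filter (fun x => decide (x ≠ -1)) =
      ((s.filter (fun v => !drop_indexes.contains v)).map
        (fun v => v - cnt - (s.countP (fun x => drop_indexes.contains x && decide (x < v)) : Int))).filter
        (fun x => decide (x ≠ -1)) := by
  intro s
  induction s with
  | nil => intro _ _; rfl
  | cons x t ih =>
    intro h cnt
    obtain ⟨hle, hpw⟩ := List.pairwise_cons.mp h
    by_cases hx : drop_indexes.contains x
    · have hxm : x ∈ drop_indexes := by simpa using hx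
      have hmap : (t.filter (fun v => !drop_indexes.contains v)).map
            (fun v => v - cnt - ((List.countP (fun y => drop_indexes.contains y && decide (y < v)) (x :: t)) : Int))
          = (t.filter (fun v => !drop_indexes.contains v)).map
            (fun v => v - (cnt + 1) - ((List.countP (fun y => drop_indexes.contains y && decide (y < v)) t) : Int)) := by
        apply List.map_congr_left
        intro v hv
        rw [List.mem_filter] at hv
        have hvne : x ≠ v := by
          rintro rfl
          exact absurd hx (by simpa using hv.2)
        have hxv : x < v := lt_of_le_of_ne (hle v hv.1) hvne
        rw [List.countP_cons]
        simp only [hx, hxv, decide_true, Bool.and_self, if_true]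
        push_cast
        ring
      have e1 : aLoop drop_indexes (x :: t) cnt = (-1) :: aLoop drop_indexes t (cnt + 1) := by
        simp only [aLoop]
        rw [if_pos hx]
      have e2 : List.filter (fun v => !drop_indexes.contains v) (x :: t)
          = List.filter (fun v => !drop_indexes.contains v) t :=
        List.filter_cons_of_neg (by simpa using hx)
      rw [e1, e2, hmap, List.filter_cons_of_neg (by decide)]
      exact ih hpw (cnt + 1)
    · have hxm : x ∉ drop_indexes := by simpa using hx
      have h1 : List.countP (fun y => drop_indexes.contains y && decide (y < x)) t = 0 :=
        List.countP_eq_zero.mpr (by intro y hy; simp [not_lt.mpr (hle y hy)])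
      have hcount0 : (List.countP (fun y => drop_indexes.contains y && decide (y < x)) (x :: t)) = 0 := by
        rw [List.countP_cons, h1]
        simp [hxm]
      have hmap : (t.filter (fun v => !drop_indexes.contains v)).map
            (fun v => v - cnt - ((List.countP (fun y => drop_indexes.contains y && decide (y < v)) (x :: t)) : Int))
          = (t.filter (fun v => !drop_indexes.contains v)).map
            (fun v => v - cnt - ((List.countP (fun y => drop_indexes.contains y && decide (y < v)) t) : Int)) := by
        apply List.map_congr_left
        intro v hv
        rw [List.countP_cons]
        simp [hxm]
      have e1 : aLoop drop_indexes (x :: t) cnt = (x - cnt) :: aLoop drop_indexes t cnt := by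
        simp only [aLoop]
        rw [if_neg hx]
      have e2 : List.filter (fun v => !drop_indexes.contains v) (x :: t)
          = x :: List.filter (fun v => !drop_indexes.contains v) t :=
        List.filter_cons_of_pos (by simpa using hx)
      rw [e1, e2, List.map_cons]
      simp only [hcount0, Nat.cast_zero, sub_zero]
      rw [List.filter_cons, List.filter_cons, hmap, ih hpw cnt]

-- B's renumbering function, evaluated via bisect_left, equals the countP-over-row form
lemma alt_map_eq (row : List Int) (drop_indexes : List Int) :
    (PySem.List.sorted (row.filter (fun v => !drop_indexes.contains v)) (fun x => x)).map
      (fun v => v - (PySem.List.bisectLeft (PySem.List.sorted (row.filter (fun v => drop_indexes.contains v)) (fun x => x)) v : Int))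
    = (PySem.List.sorted (row.filter (fun v => !drop_indexes.contains v)) (fun x => x)).map
      (fun v => v - (row.countP (fun x => drop_indexes.contains x && decide (x < v)) : Int)) := by
  apply List.map_congr_left
  intro v _
  have hbp : List.Pairwise (fun a b => a ≤ b)
      (PySem.List.sorted (row.filter (fun v => drop_indexes.contains v)) (fun x => x)) := by
    simpa using PySem.List.sorted_pairwise (row.filter (fun v => drop_indexes.contains v)) (fun x => x)
  rw [bisectLeft_eq_countP _ v hbp,
    List.Perm.countP_eq _ (PySem.List.sorted_perm (row.filter (fun v => drop_indexes.contains v)) (fun x => x) false),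
    List.countP_filter]
  have hcomm : (fun x => decide (x < v) && drop_indexes.contains x)
      = (fun x => drop_indexes.contains x && decide (x < v)) := by
    funext x
    exact Bool.and_comm _ _
  rw [hcomm]

-- A's result equals B's result with the values renumbered to -1 filtered out
lemma a_eq_alt_filter (row : List Int) (drop_indexes : List Int) (hne : drop_indexes ≠ []) :
    update_row_py row drop_indexes
      = (update_row_py_alt row drop_indexes).filter (fun x => decide (x ≠ -1)) := by
  have hc : ¬ (drop_indexes.length == 0) = true := by simp [hne]
  simp only [update_row_py, update_row_py_alt]
  rw [if_neg hc, if_neg hc]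
  have hs_pw : List.Pairwise (fun a b => a ≤ b) (PySem.List.sorted row (fun x => x)) := by
    simpa using PySem.List.sorted_pairwise row (fun x => x)
  have hs_perm := PySem.List.sorted_perm row (fun x => x) false
  rw [aLoop_filter drop_indexes _ hs_pw 0, alt_map_eq]
  have hkept : PySem.List.sorted (row.filter (fun v => !drop_indexes.contains v)) (fun x => x)
      = (PySem.List.sorted row (fun x => x)).filter (fun v => !drop_indexes.contains v) :=
    PySem.List.sorted_id_eq_of_perm_of_pairwise _ _ (hs_perm.filter _) (hs_pw.filter _)
  rw [hkept]
  congr 1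
  apply List.map_congr_left
  intro v _
  rw [List.Perm.countP_eq _ hs_perm.symm]
  ring

-- outside D_, no renumbered kept value equals -1, so B's output carries no -1
lemma alt_no_neg_one (row : List Int) (drop_indexes : List Int) (hne : drop_indexes ≠ [])
    (hD : ¬ D_update_row_py row drop_indexes) :
    ∀ w ∈ update_row_py_alt row drop_indexes, w ≠ -1 := by
  intro w hw
  have hc : ¬ (drop_indexes.length == 0) = true := by simp [hne]
  simp only [update_row_py_alt] at hw
  rw [if_neg hc, alt_map_eq] at hw
  rw [List.mem_map] at hw
  obtain ⟨v, hv, rfl⟩ := hw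
  have hv' : v ∈ row.filter (fun v => !drop_indexes.contains v) :=
    (PySem.List.sorted_perm (row.filter (fun v => !drop_indexes.contains v)) (fun x => x) false).mem_iff.mp hv
  rw [List.mem_filter] at hv'
  intro hcontra
  exact hD ⟨hne, v, hv'.1, by simpa using hv'.2, hcontra⟩

-- ===== VERDICT (by name: the statements are the Claim_ definitions above) =====
theorem update_row_py_spec : Claim_unchanged_update_row_py := by
  intro row drop_indexes _ hD
  by_cases hne : drop_indexes = []
  · subst hne
    simp [update_row_py, update_row_py_alt]
  · rw [a_eq_alt_filter row drop_indexes hne]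
    exact List.filter_eq_self.mpr (fun w hw => by
      simpa using alt_no_neg_one row drop_indexes hne hD w hw)

theorem update_row_py_changed : Claim_changed_update_row_py := by
  unfold Claim_changed_update_row_py; decide

theorem update_row_py_tight : Claim_exact_update_row_py := by
  intro row drop_indexes _ hD heq
  obtain ⟨hne, v, hvrow, hvnd, hval⟩ := hD
  have hc : ¬ (drop_indexes.length == 0) = true := by simp [hne]
  -- -1 is an element of B's output…
  have hmem : (-1 : Int) ∈ update_row_py_alt row drop_indexes := by
    simp only [update_row_py_alt]
    rw [if_neg hc, alt_map_eq, List.mem_map]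
    refine ⟨v, ?_, hval⟩
    exact (PySem.List.sorted_perm (row.filter (fun v => !drop_indexes.contains v)) (fun x => x) false).symm.mem_iff.mp
      (List.mem_filter.mpr ⟨hvrow, by simpa using hvnd⟩)
  -- …but never of A's output
  have hnmem : (-1 : Int) ∉ update_row_py row drop_indexes := by
    simp only [update_row_py]
    rw [if_neg hc]
    intro hmem'
    have := (List.mem_filter.mp hmem').2
    simp at this
  exact hnmem (heq ▸ hmem)
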